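-- pv_equiv track=rewrite | github.com/ViktorRosler/IMPA | python/10622.py | search
-- ===== SOURCE A (Python) =====
-- def search(b, t, mult, init):
-- 	bot = b
-- 	top = t
-- 	mid = (bot + top) // 2
-- 	while top >= bot:
-- 		num = mid ** mult
-- 		if 	num == init:
-- 			return True
-- 		elif num > init:
-- 			top = mid - 1
-- 			mid = (bot + top) // 2
-- 		elif num < init:
-- 			bot = mid + 1
-- 			mid = (bot + top) // 2
-- 	return False
-- ===== SOURCE B (Python) =====
-- def search(b, t, mult, init):
--     def go(bot, top):
--         if top < bot:
--             return False
--         mid = (bot + top) // 2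
--         num = mid ** mult
--         if num == init:
--             return True
--         if num > init:
--             return go(bot, mid - 1)
--         return go(mid + 1, top)
--     return go(b, t)
-- ===== Notes on version B (the rewrite author's own statement) =====
-- stated objective: simpler
-- what changed: The iterative while-loop with three mutable variables (bot, top, mid recomputed in two branches) becomes a recursive divide-and-conquer helper on the bounds (bot, top) that computes mid once per call.
-- outside the precondition, e.g. on search(1, 1, -1, 1): A returns True, B returns True; on search(0, 0, -1, 0): A raises ZeroDivisionError, B raises ZeroDivisionError
import Mathlib
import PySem

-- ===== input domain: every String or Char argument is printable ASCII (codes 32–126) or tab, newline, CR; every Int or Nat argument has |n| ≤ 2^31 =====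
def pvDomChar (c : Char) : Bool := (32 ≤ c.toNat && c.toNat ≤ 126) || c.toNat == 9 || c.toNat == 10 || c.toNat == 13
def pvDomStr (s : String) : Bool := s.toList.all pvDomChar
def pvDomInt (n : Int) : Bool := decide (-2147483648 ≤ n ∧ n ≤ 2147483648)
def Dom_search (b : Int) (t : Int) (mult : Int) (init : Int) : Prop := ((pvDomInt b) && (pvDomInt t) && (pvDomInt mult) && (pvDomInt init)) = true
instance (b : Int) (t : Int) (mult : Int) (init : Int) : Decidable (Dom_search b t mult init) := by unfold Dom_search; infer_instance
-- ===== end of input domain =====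

-- B rewrites A's while-loop (mutable bot/top/mid) as a recursive helper on the bounds; return values agree on Pre_ (mult ≥ 0).

-- ===== PORT A =====
-- A's while loop: state (bot, top, mid), mid recomputed in the two shrinking branches; fuel
-- only makes the loop total (the loop always terminates, see the lemmas below); mid ** mult
-- ported as mid ^ mult.toNat, exact on Pre_ (0 ≤ mult).
def searchLoopA (fuel : Nat) (bot top mid mult init : Int) : Bool :=
  match fuel with
  | 0 => false
  | fuel + 1 =>
    if top ≥ bot then
      let num := mid ^ mult.toNat
      if num = init then true
      else if num > init then
        searchLoopA fuel bot (mid - 1) (PySem.Int.floordiv (bot + (mid - 1)) 2) mult init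
      else
        searchLoopA fuel (mid + 1) top (PySem.Int.floordiv ((mid + 1) + top) 2) mult init
    else false

def search (b : Int) (t : Int) (mult : Int) (init : Int) : Bool :=
  searchLoopA (t - b + 2).toNat b t (PySem.Int.floordiv (b + t) 2) mult init

-- ===== PORT B =====
-- Source B's 'mid ** mult': Python-exact for 0 <= mult (the Pre_ domain); for negative mult Python
-- leaves the integers (a float power), modeled here by the default 0.
def pyPowB (base : Int) (exp : Int) : Int :=
  if exp < 0 then 0 else base ^ exp.toNat

def searchGo (bot top mult init : Int) : Bool :=
  if h : top < bot then false
  else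
    let mid := PySem.Int.floordiv (bot + top) 2
    let num := pyPowB mid mult
    if num = init then true
    else if num > init then searchGo bot (mid - 1) mult init
    else searchGo (mid + 1) top mult init
termination_by (top - bot + 1).toNat
decreasing_by
  · have := PySem.Int.floordiv_two_mid_bounds (lo := bot) (hi := top) (by omega)
    omega
  · have := PySem.Int.floordiv_two_mid_bounds (lo := bot) (hi := top) (by omega)
    omega

def search_alt (b : Int) (t : Int) (mult : Int) (init : Int) : Bool :=
  searchGo b t mult init

-- ===== PRECONDITION & SPEC =====
-- Pre_ excludes negative mult: there Python evaluates mid ** mult in floating point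
-- (raising ZeroDivisionError when mid reaches 0), which the Int-typed ports cannot represent.
def Pre_search (b : Int) (t : Int) (mult : Int) (init : Int) : Prop := 0 ≤ mult
instance (b : Int) (t : Int) (mult : Int) (init : Int) : Decidable (Pre_search b t mult init) := by unfold Pre_search; infer_instance

def pvWitness_search : Int × Int × Int × Int := (0, 10, 2, 9)

def Spec_search (b : Int) (t : Int) (mult : Int) (init : Int) (out : Bool) : Prop := out = search_alt b t mult init
instance (b : Int) (t : Int) (mult : Int) (init : Int) (out : Bool) : Decidable (Spec_search b t mult init out) := by unfold Spec_search; infer_instance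

-- ===== CLAIM (what is proved, stated in full; the proofs are below) =====
def Claim_equal_search : Prop := ∀ (b : Int) (t : Int) (mult : Int) (init : Int), Dom_search b t mult init → Pre_search b t mult init → Spec_search b t mult init (search b t mult init)

-- ===== LEMMAS AND PROOFS =====

-- Loop body equivalence: with enough fuel and mid = (bot+top)//2, A's loop equals B's recursion.
theorem searchLoopA_eq_go (fuel : Nat) (bot top mult init : Int)
    (hm : 0 ≤ mult) (hfuel : top - bot < (fuel : Int)) :
    searchLoopA fuel bot top (PySem.Int.floordiv (bot + top) 2) mult init
      = searchGo bot top mult init := by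
  induction fuel generalizing bot top with
  | zero => rw [searchLoopA, searchGo, dif_pos (by omega)]
  | succ fuel ih =>
    rw [searchLoopA, searchGo]
    by_cases hbt : top < bot
    · rw [if_neg (by omega), dif_pos hbt]
    · have hmid := PySem.Int.floordiv_two_mid_bounds (lo := bot) (hi := top) (by omega)
      rw [if_pos (by omega), dif_neg hbt]
      dsimp only
      rw [pyPowB, if_neg (by omega : ¬ mult < 0)]
      split_ifs with h1 h2
      · rfl
      · exact ih bot (PySem.Int.floordiv (bot + top) 2 - 1) (by omega)
      · exact ih (PySem.Int.floordiv (bot + top) 2 + 1) top (by omega)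

-- ===== VERDICT (by name: the statement is the Claim_ definition above) =====
theorem search_spec : Claim_equal_search := by
  intro b t mult init _ hpre
  unfold Spec_search search search_alt
  exact searchLoopA_eq_go _ b t mult init hpre (by omega)
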